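-- pv_equiv track=rewrite | github.com/Atoku/siku | python/siku/noisy_grid.py | make_pairs
-- ===== SOURCE A (Python) =====
-- def make_pairs( lst ):
--     '''Utility: generates sorted list of pairs of indexes from raw list'''
--     l = len(lst)
--     res = []
--     for i in range( l-1 ):
--         for j in range(i+1, l):
--             res.append( ( min(lst[i], lst[j]), max(lst[i], lst[j]) ) )
--     res.sort()
--
--     return res
-- ===== SOURCE B (Python) =====
-- def make_pairs(lst):
--     '''Utility: generates sorted list of pairs of indexes from raw list'''
--     cnt = {}
--     for x in lst:
--         cnt[x] = cnt.get(x, 0) + 1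
--     vals = sorted(cnt)
--     res = []
--     for i, x in enumerate(vals):
--         k = cnt[x]
--         res += [(x, x)] * (k * (k - 1) // 2)
--         for y in vals[i + 1:]:
--             res += [(x, y)] * (k * cnt[y])
--     return res
-- ===== Notes on version B (the rewrite author's own statement) =====
-- stated objective: alternative
-- what changed: B builds a value-count dictionary in one pass and emits each pair (x,x) C(k,2) times and (x,y) count[x]*count[y] times while iterating over the sorted distinct values, producing the sorted result directly instead of enumerating all index pairs and sorting the quadratic pair list.
import Mathlib
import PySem

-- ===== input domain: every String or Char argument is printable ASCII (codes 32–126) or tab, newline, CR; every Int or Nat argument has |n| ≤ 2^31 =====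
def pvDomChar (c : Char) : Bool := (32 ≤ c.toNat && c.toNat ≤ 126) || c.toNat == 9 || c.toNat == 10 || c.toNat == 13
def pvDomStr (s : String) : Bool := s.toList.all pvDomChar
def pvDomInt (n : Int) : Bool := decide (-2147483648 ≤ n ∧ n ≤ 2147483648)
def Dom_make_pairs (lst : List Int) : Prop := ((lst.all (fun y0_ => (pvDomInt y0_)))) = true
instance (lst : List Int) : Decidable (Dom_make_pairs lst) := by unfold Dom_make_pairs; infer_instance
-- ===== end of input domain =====

-- B replaces A's index-pair enumeration plus final sort by a one-pass value count and direct
-- emission of the repeated pairs over the sorted distinct values (objective: alternative).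

-- ===== PORT A =====
def make_pairs (lst : List Int) : List (Int × Int) :=
  let l : Int := lst.length
  let res : List (Int × Int) :=
    (PySem.List.pyRange 0 (l - 1) 1).foldl (fun res i =>
      (PySem.List.pyRange (i + 1) l 1).foldl (fun res j =>
        res ++ [(min (PySem.List.pyGetD lst i 0) (PySem.List.pyGetD lst j 0),
                 max (PySem.List.pyGetD lst i 0) (PySem.List.pyGetD lst j 0))]) res) []
  PySem.List.sorted2 res Prod.fst Prod.snd

-- ===== PORT B =====
def make_pairs_alt (lst : List Int) : List (Int × Int) :=
  let cnt : PySem.Dict Int Int := lst.foldl (fun d x => d.insert x (d.getD x 0 + 1)) PySem.Dict.empty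
  let vals : List Int := PySem.List.sorted cnt.keys (fun x => x)
  (PySem.List.enumerate vals).foldl (fun res p =>
    let x := p.2
    let k := cnt.getD x 0
    let res := res ++ PySem.List.pyRepeat [(x, x)] (PySem.Int.floordiv (k * (k - 1)) 2)
    (PySem.List.slice vals (some (p.1 + 1)) none).foldl (fun res y =>
      res ++ PySem.List.pyRepeat [(x, y)] (k * cnt.getD y 0)) res) []

-- ===== PRECONDITION & SPEC =====
def Spec_make_pairs (lst : List Int) (out : List (Int × Int)) : Prop := out = make_pairs_alt lst
instance (lst : List Int) (out : List (Int × Int)) : Decidable (Spec_make_pairs lst out) := by unfold Spec_make_pairs; infer_instance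

-- ===== CLAIM (what is proved, stated in full; the proofs are below) =====
def Claim_equal_make_pairs : Prop := ∀ (lst : List Int), Dom_make_pairs lst → Spec_make_pairs lst (make_pairs lst)

-- ===== LEMMAS AND PROOFS =====

-- A's unsorted pair list, structurally: head paired with every later element, then the tail's pairs.
def pairsG : List Int → List (Int × Int)
  | [] => []
  | a :: t => t.map (fun b => (min a b, max a b)) ++ pairsG t

-- B's output, structurally over the (strictly increasing) list of distinct values with count function c.
def emitFrom (c : Int → Nat) : List Int → List (Int × Int)
  | [] => []
  | x :: rest =>
      List.replicate ((c x).choose 2) (x, x)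
      ++ rest.flatMap (fun y => List.replicate (c x * c y) (x, y))
      ++ emitFrom c rest

-- B's loop body, generically: self block, cross blocks, recurse.
def emitG (S : Int → List (Int × Int)) (C : Int → Int → List (Int × Int)) : List Int → List (Int × Int)
  | [] => []
  | x :: rest => S x ++ rest.flatMap (C x) ++ emitG S C rest

-- Python's tuple comparison is the lexicographic order on Int × Int.
lemma sorted2_eq_sorted_lex (xs : List (Int × Int)) :
    PySem.List.sorted2 xs Prod.fst Prod.snd
      = PySem.List.sorted xs (fun x => toLex x) := by
  have hb : (fun (a b : Int × Int) => decide (a.1 < b.1) || (!decide (b.1 < a.1) && decide (a.2 < b.2)))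
      = (fun (a b : Int × Int) => decide ((toLex a : Lex (Int × Int)) < toLex b)) := by
    funext a b
    rcases a with ⟨a1, a2⟩; rcases b with ⟨b1, b2⟩
    by_cases h1 : a1 < b1 <;> by_cases h2 : b1 < a1 <;> by_cases h3 : a2 < b2 <;>
      simp [Prod.Lex.lt_iff, h1, h2, h3] <;> omega
  show List.foldl (fun acc x => PySem.List.insertBy
      (fun a b => decide (a.1 < b.1) || (!decide (b.1 < a.1) && decide (a.2 < b.2))) x acc) [] xs
    = List.foldl (fun acc x => PySem.List.insertBy
      (fun a b => decide ((toLex a : Lex (Int × Int)) < toLex b)) x acc) [] xs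
  rw [hb]

-- Nat-indexed normal form of A's double loop
lemma flat_nat : ∀ lst : List Int,
    (List.range (lst.length - 1)).flatMap
      (fun k => (lst.drop (k + 1)).map (fun b => (min (lst.getD k 0) b, max (lst.getD k 0) b)))
      = pairsG lst := by
  intro lst
  induction lst with
  | nil => rfl
  | cons a t ih =>
    cases t with
    | nil => rfl
    | cons b t' =>
      have hlen : (a :: b :: t').length - 1 = t'.length + 1 := by simp
      rw [pairsG, hlen, List.range_succ_eq_map, List.flatMap_cons, List.flatMap_map]
      refine congrArg₂ (· ++ ·) (by simp) ?_
      rw [← ih]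
      simp only [List.length_cons, Nat.add_sub_cancel]
      exact List.flatMap_congr fun k hk => by
        simp [List.drop_succ_cons]

-- A's port computes sorted(pairsG lst) under the lexicographic key
lemma make_pairs_eq_sorted (lst : List Int) :
    make_pairs lst = PySem.List.sorted (pairsG lst) (fun x => toLex x) := by
  have h0 : make_pairs lst = PySem.List.sorted2
      ((PySem.List.pyRange 0 ((lst.length : Int) - 1) 1).foldl (fun res i =>
        (PySem.List.pyRange (i + 1) (lst.length : Int) 1).foldl (fun res j =>
          res ++ [(min (PySem.List.pyGetD lst i 0) (PySem.List.pyGetD lst j 0),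
                   max (PySem.List.pyGetD lst i 0) (PySem.List.pyGetD lst j 0))]) res) [])
      Prod.fst Prod.snd := rfl
  rw [h0, sorted2_eq_sorted_lex]
  congr 1
  have h1 : (fun (res : List (Int × Int)) (i : Int) =>
      (PySem.List.pyRange (i + 1) (lst.length : Int) 1).foldl (fun res j =>
        res ++ [(min (PySem.List.pyGetD lst i 0) (PySem.List.pyGetD lst j 0),
                 max (PySem.List.pyGetD lst i 0) (PySem.List.pyGetD lst j 0))]) res)
      = (fun res i => res ++ (PySem.List.pyRange (i + 1) (lst.length : Int) 1).map
          (fun j => (min (PySem.List.pyGetD lst i 0) (PySem.List.pyGetD lst j 0),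
                     max (PySem.List.pyGetD lst i 0) (PySem.List.pyGetD lst j 0)))) := by
    funext res i
    exact PySem.List.foldl_append_singleton_eq_map _ _ _
  rw [h1, PySem.List.foldl_append_eq_flatMap, List.nil_append]
  rw [PySem.List.pyRange_one, List.flatMap_map]
  have hn : (((lst.length : Int) - 1) - 0).toNat = lst.length - 1 := by omega
  rw [hn, ← flat_nat lst]
  refine List.flatMap_congr fun k hk => ?_
  have hk0 : (0 : Int) + (k : Int) = (k : Int) := by ring
  rw [hk0]
  have h2 : (fun j => (min (PySem.List.pyGetD lst (k : Int) 0) (PySem.List.pyGetD lst j 0),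
                       max (PySem.List.pyGetD lst (k : Int) 0) (PySem.List.pyGetD lst j 0)))
      = (fun b => (min (PySem.List.pyGetD lst (k : Int) 0) b,
                   max (PySem.List.pyGetD lst (k : Int) 0) b))
        ∘ (fun j => PySem.List.pyGetD lst j 0) := rfl
  rw [h2, ← List.map_map]
  rw [PySem.List.map_pyGetD_pyRange' lst 0 (by positivity)]
  have h3 : ((k : Int) + 1).toNat = k + 1 := by omega
  rw [h3]
  simp [PySem.List.pyGetD_natCast]

-- the floor-division self-pair multiplicity is the binomial coefficient
lemma floordiv_choose (c : Nat) :
    (PySem.Int.floordiv ((c : Int) * ((c : Int) - 1)) 2).toNat = c.choose 2 := by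
  cases c with
  | zero => decide
  | succ n =>
    have h : ((n + 1 : Nat) : Int) * (((n + 1 : Nat) : Int) - 1) = (((n + 1) * n : Nat) : Int) := by
      push_cast; ring
    rw [h, show (2 : Int) = ((2 : Nat) : Int) from rfl, PySem.Int.floordiv_natCast,
      Int.toNat_natCast, Nat.choose_two_right]
    simp

-- B's enumerate/slice loop is the structural recursion emitG
lemma enum_flat (S : Int → List (Int × Int)) (C : Int → Int → List (Int × Int)) (vals : List Int) :
    ∀ (suf : List Int) (k : Nat), vals.drop k = suf →
    (PySem.List.enumerate suf (k : Int)).flatMap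
      (fun p => S p.2 ++ (PySem.List.slice vals (some (p.1 + 1)) none).flatMap (C p.2))
    = emitG S C suf := by
  intro suf
  induction suf with
  | nil => intro k hk; simp [PySem.List.enumerate, emitG]
  | cons x rest ih =>
    intro k hk
    have hdrop : vals.drop (k + 1) = rest := by
      have h := congrArg (List.drop 1) hk
      simpa [List.drop_drop] using h
    have hslice : PySem.List.slice vals (some ((k : Int) + 1)) none = rest := by
      rw [PySem.List.slice_from vals (show (0 : Int) ≤ (k : Int) + 1 by positivity)]
      have h1 : ((k : Int) + 1).toNat = k + 1 := by omega
      rw [h1, hdrop]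
    have hcast : (k : Int) + 1 = ((k + 1 : Nat) : Int) := by push_cast; ring
    simp only [PySem.List.enumerate_cons, List.flatMap_cons]
    rw [hslice, hcast, ih (k + 1) hdrop]
    simp [emitG, List.append_assoc]

-- the generic loop body instantiated with B's blocks is emitFrom over the counts
lemma emitG_eq_emitFrom (lst : List Int) : ∀ vals : List Int,
    emitG (fun x => PySem.List.pyRepeat [(x, x)]
        (PySem.Int.floordiv ((PySem.Dict.counter lst).getD x 0 * ((PySem.Dict.counter lst).getD x 0 - 1)) 2))
      (fun x y => PySem.List.pyRepeat [(x, y)]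
        ((PySem.Dict.counter lst).getD x 0 * (PySem.Dict.counter lst).getD y 0))
      vals = emitFrom (fun v => lst.count v) vals := by
  intro vals
  induction vals with
  | nil => rfl
  | cons x rest ih =>
    simp only [emitG, emitFrom, ih]
    congr 1
    congr 1
    · rw [PySem.Dict.getD_counter, PySem.List.pyRepeat_singleton, floordiv_choose]
    · refine List.flatMap_congr fun y hy => ?_
      rw [PySem.Dict.getD_counter, PySem.Dict.getD_counter, PySem.List.pyRepeat_singleton]
      rw [← Nat.cast_mul, Int.toNat_natCast]

-- B's port computes emitFrom (count) (sorted distinct values)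
lemma make_pairs_alt_eq_emitFrom (lst : List Int) :
    make_pairs_alt lst
      = emitFrom (fun v => lst.count v)
          (PySem.List.sorted (PySem.Set.ofList lst) (fun x => x)) := by
  have h0 : make_pairs_alt lst =
      (PySem.List.enumerate (PySem.List.sorted (PySem.Dict.counter lst).keys (fun x => x))).foldl
        (fun res p =>
          (PySem.List.slice (PySem.List.sorted (PySem.Dict.counter lst).keys (fun x => x))
              (some (p.1 + 1)) none).foldl
            (fun res y => res ++ PySem.List.pyRepeat [(p.2, y)]
              ((PySem.Dict.counter lst).getD p.2 0 * (PySem.Dict.counter lst).getD y 0))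
            (res ++ PySem.List.pyRepeat [(p.2, p.2)]
              (PySem.Int.floordiv
                ((PySem.Dict.counter lst).getD p.2 0 * ((PySem.Dict.counter lst).getD p.2 0 - 1)) 2))) [] := by
    conv_rhs => rw [← PySem.Dict.foldl_insert_getD_add_one_eq_counter lst]
    rfl
  rw [h0, PySem.Dict.keys_counter]
  have h1 : (fun (res : List (Int × Int)) (p : Int × Int) =>
      (PySem.List.slice (PySem.List.sorted (PySem.Set.ofList lst) (fun x => x))
          (some (p.1 + 1)) none).foldl
        (fun res y => res ++ PySem.List.pyRepeat [(p.2, y)]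
          ((PySem.Dict.counter lst).getD p.2 0 * (PySem.Dict.counter lst).getD y 0))
        (res ++ PySem.List.pyRepeat [(p.2, p.2)]
          (PySem.Int.floordiv
            ((PySem.Dict.counter lst).getD p.2 0 * ((PySem.Dict.counter lst).getD p.2 0 - 1)) 2)))
      = (fun res p => res ++
          ((PySem.List.pyRepeat [(p.2, p.2)]
            (PySem.Int.floordiv
              ((PySem.Dict.counter lst).getD p.2 0 * ((PySem.Dict.counter lst).getD p.2 0 - 1)) 2))
          ++ (PySem.List.slice (PySem.List.sorted (PySem.Set.ofList lst) (fun x => x))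
                (some (p.1 + 1)) none).flatMap
              (fun y => PySem.List.pyRepeat [(p.2, y)]
                ((PySem.Dict.counter lst).getD p.2 0 * (PySem.Dict.counter lst).getD y 0)))) := by
    funext res p
    rw [PySem.List.foldl_append_eq_flatMap, List.append_assoc]
  rw [h1, PySem.List.foldl_append_eq_flatMap, List.nil_append]
  refine Eq.trans ?_ (emitG_eq_emitFrom lst _)
  exact enum_flat
    (fun x => PySem.List.pyRepeat [(x, x)]
      (PySem.Int.floordiv ((PySem.Dict.counter lst).getD x 0 * ((PySem.Dict.counter lst).getD x 0 - 1)) 2))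
    (fun x y => PySem.List.pyRepeat [(x, y)]
      ((PySem.Dict.counter lst).getD x 0 * (PySem.Dict.counter lst).getD y 0))
    (PySem.List.sorted (PySem.Set.ofList lst) (fun x => x))
    (PySem.List.sorted (PySem.Set.ofList lst) (fun x => x)) 0 List.drop_zero

-- classification of when a min/max pair hits (u, v)
lemma pr_eq_iff (a b u v : Int) (huv : u ≤ v) :
    ((min a b, max a b) = (u, v)) ↔ ((a = u ∧ b = v) ∨ (a = v ∧ b = u)) := by
  rw [Prod.mk.injEq]
  rcases le_total a b with h | h
  · rw [min_eq_left h, max_eq_right h]; omega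
  · rw [min_eq_right h, max_eq_left h]; omega

-- counting (u, v) among the pairs of a fixed a with a list t
lemma count_map_pr (a u v : Int) (huv : u ≤ v) : ∀ t : List Int,
    (t.map (fun b => (min a b, max a b))).count (u, v)
      = if a = u ∧ u = v then t.count u
        else if a = u then t.count v
        else if a = v then t.count u
        else 0 := by
  intro t
  induction t with
  | nil => simp
  | cons b t ih =>
    simp only [List.map_cons, List.count_cons, ih, beq_iff_eq]
    by_cases h1 : a = u <;> by_cases h2 : a = v <;> by_cases h3 : b = u <;> by_cases h4 : b = v <;>
      by_cases h5 : u = v <;>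
      simp [pr_eq_iff a b u v huv, h1, h2, h3, h4, h5] <;>
      first | omega | (split_ifs <;> omega)

lemma count_pairsG_lt (u v : Int) (huv : u < v) : ∀ lst : List Int,
    (pairsG lst).count (u, v) = lst.count u * lst.count v := by
  intro lst
  induction lst with
  | nil => simp [pairsG]
  | cons a t ih =>
    have h5 : ¬ (u = v) := ne_of_lt huv
    have h5' : ¬ (v = u) := fun h => h5 h.symm
    rw [pairsG, List.count_append, count_map_pr a u v (le_of_lt huv) t, ih]
    by_cases h1 : a = u <;> by_cases h2 : a = v <;>
      simp [h1, h2, h5, h5'] <;> ring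

lemma count_pairsG_eq (u : Int) : ∀ lst : List Int,
    (pairsG lst).count (u, u) = (lst.count u).choose 2 := by
  intro lst
  induction lst with
  | nil => simp [pairsG]
  | cons a t ih =>
    rw [pairsG, List.count_append, count_map_pr a u u le_rfl t, ih]
    by_cases h1 : a = u <;>
      simp [h1, Nat.choose_succ_succ, Nat.choose_one_right]

lemma mem_pairsG (p : Int × Int) : ∀ lst : List Int, p ∈ pairsG lst → p.1 ≤ p.2 := by
  intro lst
  induction lst with
  | nil => simp [pairsG]
  | cons a t ih =>
    simp only [pairsG, List.mem_append, List.mem_map]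
    rintro (⟨b, _, rfl⟩ | h)
    · exact min_le_max
    · exact ih h

lemma count_pairsG_gt (u v : Int) (huv : v < u) : ∀ lst : List Int,
    (pairsG lst).count (u, v) = 0 := by
  intro lst
  rw [List.count_eq_zero]
  intro hmem
  have h := mem_pairsG (u, v) lst hmem
  simp at h
  omega

-- counting (u, v) among the cross pairs of a fixed x with a duplicate-free list
lemma count_cross (x : Int) (c : Int → Nat) (u v : Int) : ∀ rest : List Int, rest.Nodup →
    (rest.flatMap (fun y => List.replicate (c x * c y) (x, y))).count (u, v)
      = if u = x ∧ v ∈ rest then c x * c v else 0 := by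
  intro rest
  induction rest with
  | nil => simp
  | cons y rest ih =>
    intro hnd
    have hy : y ∉ rest := (List.nodup_cons.mp hnd).1
    rw [List.flatMap_cons, List.count_append, List.count_replicate, ih (List.nodup_cons.mp hnd).2]
    by_cases h1 : u = x <;> by_cases h2 : v = y <;>
      simp [h1, h2, Prod.mk.injEq, List.mem_cons, hy] <;> tauto

-- counting (u, v) in B's emission over a strictly increasing value list
lemma count_emitFrom (c : Int → Nat) (u v : Int) : ∀ vals : List Int,
    vals.Pairwise (· < ·) →
    (emitFrom c vals).count (u, v)
      = if u ∈ vals ∧ v ∈ vals then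
          (if u = v then (c u).choose 2 else if u < v then c u * c v else 0)
        else 0 := by
  intro vals
  induction vals with
  | nil => simp [emitFrom]
  | cons x rest ih =>
    intro hpw
    obtain ⟨hx, hrest⟩ := List.pairwise_cons.mp hpw
    have hnd : rest.Nodup := hrest.imp (fun h => ne_of_lt h)
    have hxr : x ∉ rest := fun hmem => lt_irrefl x (hx x hmem)
    simp only [emitFrom]
    rw [List.count_append, List.count_append, List.count_replicate,
      count_cross x c u v rest hnd, ih hrest]
    by_cases h1 : u = x
    · subst h1
      by_cases h2 : v = u
      · subst h2; simp [hxr]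
      · by_cases h4 : v ∈ rest
        · have hv : u < v := hx v h4
          simp [h2, h4, hxr, hv, Prod.mk.injEq, List.mem_cons, Ne.symm h2]
        · simp [h2, h4, hxr, Prod.mk.injEq, List.mem_cons, Ne.symm h2]
    · by_cases h3 : u ∈ rest
      · have hu : x < u := hx u h3
        by_cases h2 : v = x
        · subst h2
          have hnv : ¬ u < v := not_lt.mpr (le_of_lt hu)
          have h1' : ¬ v = u := fun h => h1 h.symm
          simp [h1, h3, hxr, hnv, h1', Prod.mk.injEq, List.mem_cons]
        · have h1' : ¬ x = u := fun h => h1 h.symm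
          simp [h1, h1', h2, h3, Prod.mk.injEq, List.mem_cons]
      · have h1' : ¬ x = u := fun h => h1 h.symm
        simp [h1, h1', h3, Prod.mk.injEq, List.mem_cons]

-- the two unsorted multisets agree
lemma emitFrom_perm_pairsG (lst : List Int) :
    (emitFrom (fun v => lst.count v)
        (PySem.List.sorted (PySem.Set.ofList lst) (fun x => x))).Perm (pairsG lst) := by
  rw [List.perm_iff_count]
  rintro ⟨u, v⟩
  rw [count_emitFrom _ u v _ (PySem.List.sorted_ofList_pairwise_lt lst)]
  have hmem : ∀ w : Int, w ∈ PySem.List.sorted (PySem.Set.ofList lst) (fun x => x) ↔ w ∈ lst := by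
    intro w; rw [PySem.List.mem_sorted, PySem.Set.mem_ofList]
  rcases lt_trichotomy u v with h | h | h
  · rw [count_pairsG_lt u v h lst]
    by_cases hu : u ∈ lst <;> by_cases hv : v ∈ lst <;>
      simp [hmem, hu, hv, ne_of_lt h, h, List.count_eq_zero.mpr]
  · subst h
    rw [count_pairsG_eq u lst]
    by_cases hu : u ∈ lst
    · simp [hmem, hu]
    · simp [hmem, hu, List.count_eq_zero.mpr hu]
  · rw [count_pairsG_gt u v h lst]
    have hnv : ¬ u < v := not_lt.mpr (le_of_lt h)
    have hne : ¬ u = v := ne_of_gt h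
    simp [hnv, hne]

-- membership in B's emission fixes the first component
lemma mem_emitFrom_fst (c : Int → Nat) (p : Int × Int) : ∀ vals : List Int,
    p ∈ emitFrom c vals → p.1 ∈ vals := by
  intro vals
  induction vals with
  | nil => simp [emitFrom]
  | cons x rest ih =>
    intro hp
    simp only [emitFrom, List.mem_append, List.mem_flatMap, List.mem_replicate] at hp
    rcases hp with (⟨-, rfl⟩ | ⟨y, hy, -, rfl⟩) | hp
    · simp
    · simp
    · exact List.mem_cons_of_mem _ (ih hp)

lemma lex_le_of (p q : Int × Int) (h : p.1 < q.1 ∨ (p.1 = q.1 ∧ p.2 ≤ q.2)) :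
    (toLex p : Lex (Int × Int)) ≤ toLex q := by
  rw [Prod.Lex.le_iff]; simpa using h

lemma pairwise_cross (x : Int) (m : Int → Nat) : ∀ rest : List Int, rest.Pairwise (· < ·) →
    (rest.flatMap (fun y => List.replicate (m y) (x, y))).Pairwise
      (fun p q : Int × Int => (toLex p : Lex (Int × Int)) ≤ toLex q) := by
  intro rest
  induction rest with
  | nil => simp
  | cons y rest ih =>
    intro hpw
    obtain ⟨hy, hrest⟩ := List.pairwise_cons.mp hpw
    rw [List.flatMap_cons]
    refine List.pairwise_append.mpr ⟨?_, ih hrest, ?_⟩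
    · exact List.pairwise_replicate.mpr (Or.inr le_rfl)
    · intro p hp q hq
      obtain ⟨-, rfl⟩ := List.mem_replicate.mp hp
      obtain ⟨y', hy', hq'⟩ := List.mem_flatMap.mp hq
      obtain ⟨-, rfl⟩ := List.mem_replicate.mp hq'
      exact lex_le_of _ _ (Or.inr ⟨rfl, le_of_lt (hy y' hy')⟩)

-- B's emission is lexicographically sorted
lemma pairwise_emitFrom (c : Int → Nat) : ∀ vals : List Int, vals.Pairwise (· < ·) →
    (emitFrom c vals).Pairwise
      (fun p q : Int × Int => (toLex p : Lex (Int × Int)) ≤ toLex q) := by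
  intro vals
  induction vals with
  | nil => simp [emitFrom]
  | cons x rest ih =>
    intro hpw
    obtain ⟨hx, hrest⟩ := List.pairwise_cons.mp hpw
    simp only [emitFrom]
    refine List.pairwise_append.mpr ⟨List.pairwise_append.mpr ⟨?_, ?_, ?_⟩, ih hrest, ?_⟩
    · exact List.pairwise_replicate.mpr (Or.inr le_rfl)
    · exact pairwise_cross x _ rest hrest
    · intro p hp q hq
      obtain ⟨-, rfl⟩ := List.mem_replicate.mp hp
      obtain ⟨y, hy, hq'⟩ := List.mem_flatMap.mp hq
      obtain ⟨-, rfl⟩ := List.mem_replicate.mp hq'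
      exact lex_le_of _ _ (Or.inr ⟨rfl, le_of_lt (hx y hy)⟩)
    · intro p hp q hq
      have hq1 : q.1 ∈ rest := mem_emitFrom_fst c q rest hq
      have hp1 : p.1 = x := by
        rcases List.mem_append.mp hp with hp' | hp'
        · exact (Prod.ext_iff.mp (List.mem_replicate.mp hp').2).1
        · obtain ⟨y, hy, hp''⟩ := List.mem_flatMap.mp hp'
          exact (Prod.ext_iff.mp (List.mem_replicate.mp hp'').2).1
      exact lex_le_of _ _ (Or.inl (hp1 ▸ hx q.1 hq1))

-- ===== VERDICT (by name: the statement is the Claim_ definition above) =====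
theorem make_pairs_spec : Claim_equal_make_pairs := by
  intro lst _
  show make_pairs lst = make_pairs_alt lst
  rw [make_pairs_eq_sorted, make_pairs_alt_eq_emitFrom]
  have hvals := PySem.List.sorted_ofList_pairwise_lt (κ := Int) lst
  refine PySem.List.eq_of_perm_of_pairwise_le_of_injective
      (fun p : Int × Int => (toLex p : Lex (Int × Int)))
      (fun a b h => by simpa using h) ?_ ?_ ?_
  · exact ((PySem.List.sorted_perm _ _ _).trans (emitFrom_perm_pairsG lst).symm)
  · exact PySem.List.sorted_pairwise _ _
  · exact pairwise_emitFrom _ _ hvals
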